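-- pv_equiv track=rewrite | github.com/AdamZhouSE/pythonHomework | Code/CodeRecords/2918/60608/257376.py | minBox
-- ===== SOURCE A (Python) =====
-- def minBox(arr: list, num: int):
--     if max(arr) < num:
--         return -1
--
--     ans = max(arr)
--     for box in arr:
--         if ans > box >= num:
--             ans = box
--     return arr.index(ans)
-- ===== SOURCE B (Python) =====
-- def minBox(arr: list, num: int):
--     vals = [v for v in arr if v >= num]
--     if not vals:
--         return -1
--     return arr.index(min(vals))
-- ===== Notes on version B (the rewrite author's own statement) =====
-- stated objective: idiomatic
-- what changed: Replaces the max-seeded running-minimum loop plus guard and second max() scan with a filter of the qualifying elements, min over them, and one arr.index; C-level comprehension/min instead of a Python-level accumulator loop.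
-- crash fix: On the empty list A raises ValueError (max of empty sequence) while B returns -1. — e.g. on minBox([], 0): A raises ValueError, B returns -1
import Mathlib
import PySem

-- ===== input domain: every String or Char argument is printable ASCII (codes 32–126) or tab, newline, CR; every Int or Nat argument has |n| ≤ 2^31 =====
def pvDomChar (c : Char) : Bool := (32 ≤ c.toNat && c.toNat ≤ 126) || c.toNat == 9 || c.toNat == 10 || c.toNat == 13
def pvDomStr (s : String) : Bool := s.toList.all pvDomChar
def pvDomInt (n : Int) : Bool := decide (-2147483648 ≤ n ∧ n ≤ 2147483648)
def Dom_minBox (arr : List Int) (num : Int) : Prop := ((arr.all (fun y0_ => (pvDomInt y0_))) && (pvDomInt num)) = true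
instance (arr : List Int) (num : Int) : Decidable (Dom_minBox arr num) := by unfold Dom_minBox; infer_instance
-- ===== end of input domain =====

-- B replaces the max-seeded running-minimum loop with filter + min + index (different decomposition, same cost).

-- ===== PORT A =====
def minBox (arr : List Int) (num : Int) : Int :=
  match PySem.List.max? arr (fun x => x) with
  | none => 0  -- unreachable: Python's max raises on the empty list (excluded by Pre_)
  | some m =>
    if m < num then -1
    else
      let ans := arr.foldl (fun ans box => if ans > box ∧ box ≥ num then box else ans) m
      match PySem.List.index? arr ans with
      | none => 0  -- unreachable: ans ∈ arr
      | some k => (k : Int)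

-- ===== PORT B =====
def minBox_alt (arr : List Int) (num : Int) : Int :=
  let vals := arr.filter (fun v => decide (v ≥ num))
  match PySem.List.min? vals (fun x => x) with
  | none => -1
  | some m =>
    match PySem.List.index? arr m with
    | none => 0  -- unreachable: m ∈ arr
    | some k => (k : Int)

-- ===== PRECONDITION & SPEC =====
def Pre_minBox (arr : List Int) (num : Int) : Prop := arr ≠ []
instance (arr : List Int) (num : Int) : Decidable (Pre_minBox arr num) := by unfold Pre_minBox; infer_instance
def pvWitness_minBox : List Int × Int := ([3, 1, 4, 1], 2)

-- On the empty list A raises ValueError (max of empty sequence) while B returns -1.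
def Raises_minBox (arr : List Int) (num : Int) : Prop := arr = []
instance (arr : List Int) (num : Int) : Decidable (Raises_minBox arr num) := by unfold Raises_minBox; infer_instance
def pvRaiseWitness_minBox : List Int × Int := ([], 0)
def pvRaiseWitnessOut_minBox : Int := -1

def Spec_minBox (arr : List Int) (num : Int) (out : Int) : Prop := out = minBox_alt arr num
instance (arr : List Int) (num : Int) (out : Int) : Decidable (Spec_minBox arr num out) := by unfold Spec_minBox; infer_instance

-- ===== CLAIM =====
def Claim_equal_minBox : Prop := ∀ (arr : List Int) (num : Int), Dom_minBox arr num → Pre_minBox arr num → Spec_minBox arr num (minBox arr num)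
def Claim_raises_minBox : Prop := (∀ (arr : List Int) (num : Int), Dom_minBox arr num → Raises_minBox arr num → ¬ Pre_minBox arr num) ∧ (Dom_minBox (pvRaiseWitness_minBox.1) (pvRaiseWitness_minBox.2) ∧ Raises_minBox (pvRaiseWitness_minBox.1) (pvRaiseWitness_minBox.2) ∧ minBox_alt (pvRaiseWitness_minBox.1) (pvRaiseWitness_minBox.2) = pvRaiseWitnessOut_minBox)

-- ===== LEMMAS AND PROOFS =====

-- A's loop is a running min over the qualifying elements.
theorem loop_eq_filter_min (num : Int) (l : List Int) (a : Int) :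
    l.foldl (fun ans box => if ans > box ∧ box ≥ num then box else ans) a
      = (l.filter (fun v => decide (v ≥ num))).foldl min a := by
  induction l generalizing a with
  | nil => rfl
  | cons x t ih =>
    simp only [List.foldl_cons, List.filter_cons]
    by_cases hx : x ≥ num
    · simp only [hx, decide_true, if_true, List.foldl_cons]
      by_cases hax : a > x
      · rw [if_pos ⟨hax, trivial⟩, ih, min_eq_right (le_of_lt hax)]
      · rw [if_neg (by tauto), ih, min_eq_left (by omega)]
    · rw [if_neg (by tauto)]
      simp only [hx, decide_false, Bool.false_eq_true, if_neg, not_false_iff, ih]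

theorem foldl_min_drop (a x : Int) (t : List Int) (h : x ≤ a) :
    (x :: t).foldl min a = t.foldl min x := by
  simp [List.foldl_cons, min_eq_right h]

-- ===== VERDICT =====
theorem minBox_spec : Claim_equal_minBox := by
  intro arr num _ hpre
  unfold Spec_minBox minBox minBox_alt
  obtain ⟨x, t, rfl⟩ := List.exists_cons_of_ne_nil hpre
  rcases hmax : PySem.List.max? (x :: t) (fun x => x) with _ | m
  · exact absurd ((PySem.List.max?_eq_none_iff _ _).mp hmax) (by simp)
  have hmem := PySem.List.max?_mem hmax
  have hmaxv := PySem.List.max?_isMax hmax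
  simp only
  by_cases hlt : m < num
  · rw [if_pos hlt]
    have hnil : (x :: t).filter (fun v => decide (v ≥ num)) = [] := by
      rw [List.filter_eq_nil_iff]
      intro y hy
      have := hmaxv y hy
      simp only [decide_eq_true_eq]
      omega
    rw [hnil]
    rfl
  · rw [if_neg hlt]
    have hmf : m ∈ (x :: t).filter (fun v => decide (v ≥ num)) := by
      rw [List.mem_filter]
      exact ⟨hmem, by simp; omega⟩
    rcases hf : (x :: t).filter (fun v => decide (v ≥ num)) with _ | ⟨y, s⟩
    · rw [hf] at hmf; exact absurd hmf (by simp)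
    rw [PySem.List.min?_id_cons]
    have hy_mem : y ∈ (x :: t).filter (fun v => decide (v ≥ num)) := by rw [hf]; simp
    have hy_arr : y ∈ x :: t := (List.mem_filter.mp hy_mem).1
    have hloop : (x :: t).foldl (fun ans box => if ans > box ∧ box ≥ num then box else ans) m
        = s.foldl min y := by
      rw [loop_eq_filter_min, hf, foldl_min_drop m y s (hmaxv y hy_arr)]
    simp only [hloop]

@[simp] theorem minBox_raises : Claim_raises_minBox := by
  unfold Claim_raises_minBox
  exact ⟨fun arr num _ h hp => hp h, by decide⟩
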